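-- pv_equiv track=rewrite | github.com/VishnuSwaminathan/primer-designer | entropy/primer_finder_classes.py | _alignment_to_string
-- ===== SOURCE A (Python) =====
-- def _alignment_to_string(alignment):
--     nuc_code_converter = {
--     "A"   :"A",
--     "G"   :"G",
--     "C"   :"C",
--     "T"   :"T",
--     "AG"  :"R",
--     "AC"  :"M",
--     "AT"  :"W",
--     "CG"  :"S",
--     "GT"  :"K",
--     "CT"  :"Y",
--     "ACG" :"V",
--     "AGT" :"D",
--     "ACT" :"H",
--     "CGT" :"B",
--     "ACGT":"N"
--     }
--
--     out = ""
--     for i in alignment: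
--         out += nuc_code_converter["".join(sorted(list(set(alignment[i]))))]
--     return out
-- ===== SOURCE B (Python) =====
-- # Bitmask re-implementation: OR together one bit per distinct base in the column
-- # and index a 16-entry code dict by the mask (no set/sort/join per column).
-- _BITS = {"A": 1, "C": 2, "G": 4, "T": 8}
-- _CODES = {1: "A", 2: "C", 3: "M", 4: "G", 5: "R", 6: "S", 7: "V",
--           8: "T", 9: "W", 10: "Y", 11: "H", 12: "K", 13: "D", 14: "B", 15: "N"}
--
-- def _alignment_to_string(alignment):
--     pieces = []
--     for i in alignment:
--         mask = 0
--         for s in alignment[i]: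
--             for c in s:
--                 mask |= _BITS[c]
--         pieces.append(_CODES[mask])
--     return "".join(pieces)
-- ===== Notes on version B (the rewrite author's own statement) =====
-- stated objective: alternative
-- what changed: Replaces the per-column set()->sorted()->join()->dict-key lookup with a bitmask (A=1,C=2,G=4,T=8) ORed over every character of the column and a 15-entry mask->code table, collecting pieces in a list joined once.
import Mathlib
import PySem

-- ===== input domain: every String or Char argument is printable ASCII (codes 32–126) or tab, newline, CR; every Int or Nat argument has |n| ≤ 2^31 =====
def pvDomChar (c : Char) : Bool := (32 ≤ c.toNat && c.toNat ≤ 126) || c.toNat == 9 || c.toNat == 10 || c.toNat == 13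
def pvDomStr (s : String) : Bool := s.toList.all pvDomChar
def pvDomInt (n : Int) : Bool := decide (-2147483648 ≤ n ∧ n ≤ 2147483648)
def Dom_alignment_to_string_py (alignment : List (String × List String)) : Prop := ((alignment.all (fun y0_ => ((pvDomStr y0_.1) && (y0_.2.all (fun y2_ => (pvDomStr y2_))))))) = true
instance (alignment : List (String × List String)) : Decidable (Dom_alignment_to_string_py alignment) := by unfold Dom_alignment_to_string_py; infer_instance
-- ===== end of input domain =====

-- B replaces A's per-column set->sorted->join dict-key with an ACGT bitmask indexing a mask->code table; equal on Pre_ (distinct keys, decodable columns).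

-- ===== PORT A =====
def pvNucCode : PySem.Dict String String := PySem.Dict.mk
  [("A","A"),("G","G"),("C","C"),("T","T"),("AG","R"),("AC","M"),("AT","W"),("CG","S"),
   ("GT","K"),("CT","Y"),("ACG","V"),("AGT","D"),("ACT","H"),("CGT","B"),("ACGT","N")]

-- sorted(...) on strings: Python's str '<' is codepoint-lexicographic, i.e. the List Char order,
-- hence the key x.toList (String's own LT does not kernel-reduce).
-- out += nuc_code_converter["".join(sorted(list(set(alignment[i]))))] ; the "" defaults are
-- unreachable under Pre_ (Python raises KeyError exactly there).
def alignment_to_string_py (alignment : List (String × List String)) : String :=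
  alignment.foldl (fun out p =>
    out ++ PySem.Dict.getD pvNucCode
      (PySem.Str.join "" (PySem.List.sorted
        (PySem.Set.ofList (PySem.Dict.getD (PySem.Dict.mk alignment) p.1 [])) (fun x => x.toList) false)) "") ""

-- ===== PORT B =====
-- _BITS[c]; returns 0 where Python B raises KeyError (such inputs are outside Pre_).
def pvBit (c : Char) : Nat :=
  if c = 'A' then 1 else if c = 'C' then 2 else if c = 'G' then 4 else if c = 'T' then 8 else 0

def pvCodes : PySem.Dict Nat String := PySem.Dict.mk
  [(1,"A"),(2,"C"),(3,"M"),(4,"G"),(5,"R"),(6,"S"),(7,"V"),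
   (8,"T"),(9,"W"),(10,"Y"),(11,"H"),(12,"K"),(13,"D"),(14,"B"),(15,"N")]

def pvMask (col : List String) : Nat :=
  col.foldl (fun m s => s.toList.foldl (fun m c => m ||| pvBit c) m) 0

def alignment_to_string_py_alt (alignment : List (String × List String)) : String :=
  PySem.Str.join "" (alignment.map (fun p =>
    PySem.Dict.getD pvCodes (pvMask (PySem.Dict.getD (PySem.Dict.mk alignment) p.1 [])) ""))

-- ===== PRECONDITION & SPEC =====
def pvValidKeys : List String :=
  ["A","G","C","T","AG","AC","AT","CG","GT","CT","ACG","AGT","ACT","CGT","ACGT"]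

-- Pre_ excludes (a) columns whose sorted deduplicated join is not an IUPAC key — Python A raises
-- KeyError there — and (b) association lists with duplicate keys, which do not represent a Python
-- dict faithfully (dict construction keeps only the last value per key).
def Pre_alignment_to_string_py (alignment : List (String × List String)) : Prop :=
  (alignment.map Prod.fst).Nodup ∧
  ∀ p ∈ alignment,
    PySem.Str.join "" (PySem.List.sorted (PySem.Set.ofList p.2) (fun x => x.toList) false) ∈ pvValidKeys

instance (alignment : List (String × List String)) : Decidable (Pre_alignment_to_string_py alignment) := by
  unfold Pre_alignment_to_string_py; infer_instance

def pvWitness_alignment_to_string_py : (List (String × List String)) :=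
  [("c1", ["A","G"]), ("c2", ["T"])]

def Spec_alignment_to_string_py (alignment : List (String × List String)) (out : String) : Prop := out = alignment_to_string_py_alt alignment
instance (alignment : List (String × List String)) (out : String) : Decidable (Spec_alignment_to_string_py alignment out) := by unfold Spec_alignment_to_string_py; infer_instance

-- ===== CLAIM (what is proved, stated in full; the proofs are below) =====
def Claim_equal_alignment_to_string_py : Prop := ∀ (alignment : List (String × List String)), Dom_alignment_to_string_py alignment → Pre_alignment_to_string_py alignment → Spec_alignment_to_string_py alignment (alignment_to_string_py alignment)

-- ===== LEMMAS AND PROOFS =====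

lemma charsJoinNil (xss : List (List Char)) : PySem.Chars.join [] xss = xss.flatten := by
  induction xss with
  | nil => simp [PySem.Chars.join_nil]
  | cons p rest ih =>
    cases rest with
    | nil => simp [PySem.Chars.join_singleton]
    | cons q r => rw [PySem.Chars.join_cons_cons]; simp [ih]

lemma joinToList (L : List String) :
    (PySem.Str.join "" L).toList = (L.map String.toList).flatten := by
  rw [PySem.Str.toList_join]
  have h : ("" : String).toList = ([] : List Char) := rfl
  rw [h, charsJoinNil]

def pvOr (cs : List Char) : Nat := cs.foldl (fun m c => m ||| pvBit c) 0

lemma foldl_or (cs : List Char) (m : Nat) :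
    cs.foldl (fun m c => m ||| pvBit c) m = m ||| pvOr cs := by
  induction cs generalizing m with
  | nil => simp [pvOr]
  | cons c rest ih =>
    simp only [pvOr, List.foldl_cons, Nat.zero_or] at *
    rw [ih (m ||| pvBit c), ih (pvBit c), Nat.or_assoc]

lemma pvOr_cons (c : Char) (rest : List Char) : pvOr (c :: rest) = pvBit c ||| pvOr rest := by
  simp only [pvOr, List.foldl_cons, Nat.zero_or]
  exact foldl_or rest (pvBit c)

lemma mask_eq_or (col : List String) : pvMask col = pvOr ((col.map String.toList).flatten) := by
  rw [pvOr, List.foldl_flatten, List.foldl_map]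
  rfl

lemma pvOr_flags (cs : List Char)
    (h : ∀ c ∈ cs, c = 'A' ∨ c = 'C' ∨ c = 'G' ∨ c = 'T') :
    pvOr cs = ((if 'A' ∈ cs then 1 else 0) ||| (if 'C' ∈ cs then 2 else 0) |||
               (if 'G' ∈ cs then 4 else 0) ||| (if 'T' ∈ cs then 8 else 0) : Nat) := by
  induction cs with
  | nil => simp [pvOr]
  | cons c rest ih =>
    rw [pvOr_cons, ih (fun d hd => h d (List.mem_cons_of_mem _ hd))]
    rcases h c (List.mem_cons_self) with hc | hc | hc | hc <;> subst hc <;>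
      by_cases h1 : 'A' ∈ rest <;> by_cases h2 : 'C' ∈ rest <;>
      by_cases h3 : 'G' ∈ rest <;> by_cases h4 : 'T' ∈ rest <;>
      simp [List.mem_cons, h1, h2, h3, h4, pvBit]

lemma mem_flatten_sorted (v : List String) (c : Char) :
    c ∈ (((PySem.List.sorted (PySem.Set.ofList v) (fun x => x.toList) false).map String.toList).flatten) ↔
    c ∈ ((v.map String.toList).flatten) := by
  simp [List.mem_flatten, List.mem_map, PySem.List.mem_sorted, PySem.Set.mem_ofList]

lemma col_case (v : List String) (J : String) (ks : List Char) (m : Nat) (r : String)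
    (hJ : J.toList = ks)
    (hmem : ∀ c : Char, c ∈ ((v.map String.toList).flatten) ↔ c ∈ J.toList)
    (hks : ∀ c ∈ ks, c = 'A' ∨ c = 'C' ∨ c = 'G' ∨ c = 'T')
    (hm : ((if 'A' ∈ ks then 1 else 0) ||| (if 'C' ∈ ks then 2 else 0) |||
           (if 'G' ∈ ks then 4 else 0) ||| (if 'T' ∈ ks then 8 else 0) : Nat) = m)
    (hc : PySem.Dict.getD pvCodes m "" = r) (hn : PySem.Dict.getD pvNucCode J "" = r) :
    PySem.Dict.getD pvCodes (pvMask v) "" = PySem.Dict.getD pvNucCode J "" := by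
  have hmem' : ∀ c : Char, c ∈ ((v.map String.toList).flatten) ↔ c ∈ ks := by
    intro c; rw [← hJ]; exact hmem c
  have hval : ∀ c ∈ (v.map String.toList).flatten, c = 'A' ∨ c = 'C' ∨ c = 'G' ∨ c = 'T' :=
    fun c hcm => hks c ((hmem' c).mp hcm)
  rw [hn, ← hc, mask_eq_or, pvOr_flags _ hval]
  congr 1
  simp only [hmem']
  exact hm

set_option maxRecDepth 8000 in
lemma col_eq (v : List String)
    (h : PySem.Str.join "" (PySem.List.sorted (PySem.Set.ofList v) (fun x => x.toList) false) ∈ pvValidKeys) :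
    PySem.Dict.getD pvCodes (pvMask v) "" =
    PySem.Dict.getD pvNucCode
      (PySem.Str.join "" (PySem.List.sorted (PySem.Set.ofList v) (fun x => x.toList) false)) "" := by
  have hmem : ∀ c : Char, c ∈ ((v.map String.toList).flatten) ↔
      c ∈ (PySem.Str.join "" (PySem.List.sorted (PySem.Set.ofList v) (fun x => x.toList) false)).toList := by
    intro c; rw [joinToList]; exact (mem_flatten_sorted v c).symm
  simp only [pvValidKeys, List.mem_cons, List.not_mem_nil, or_false] at h
  rcases h with h | h | h | h | h | h | h | h | h | h | h | h | h | h | h <;> rw [h] at hmem ⊢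
  · exact col_case v "A" ['A'] 1 "A" (by decide) hmem (by intro c hc; fin_cases hc <;> simp) (by decide) (by decide) (by decide)
  · exact col_case v "G" ['G'] 4 "G" (by decide) hmem (by intro c hc; fin_cases hc <;> simp) (by decide) (by decide) (by decide)
  · exact col_case v "C" ['C'] 2 "C" (by decide) hmem (by intro c hc; fin_cases hc <;> simp) (by decide) (by decide) (by decide)
  · exact col_case v "T" ['T'] 8 "T" (by decide) hmem (by intro c hc; fin_cases hc <;> simp) (by decide) (by decide) (by decide)
  · exact col_case v "AG" ['A','G'] 5 "R" (by decide) hmem (by intro c hc; fin_cases hc <;> simp) (by decide) (by decide) (by decide)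
  · exact col_case v "AC" ['A','C'] 3 "M" (by decide) hmem (by intro c hc; fin_cases hc <;> simp) (by decide) (by decide) (by decide)
  · exact col_case v "AT" ['A','T'] 9 "W" (by decide) hmem (by intro c hc; fin_cases hc <;> simp) (by decide) (by decide) (by decide)
  · exact col_case v "CG" ['C','G'] 6 "S" (by decide) hmem (by intro c hc; fin_cases hc <;> simp) (by decide) (by decide) (by decide)
  · exact col_case v "GT" ['G','T'] 12 "K" (by decide) hmem (by intro c hc; fin_cases hc <;> simp) (by decide) (by decide) (by decide)
  · exact col_case v "CT" ['C','T'] 10 "Y" (by decide) hmem (by intro c hc; fin_cases hc <;> simp) (by decide) (by decide) (by decide)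
  · exact col_case v "ACG" ['A','C','G'] 7 "V" (by decide) hmem (by intro c hc; fin_cases hc <;> simp) (by decide) (by decide) (by decide)
  · exact col_case v "AGT" ['A','G','T'] 13 "D" (by decide) hmem (by intro c hc; fin_cases hc <;> simp) (by decide) (by decide) (by decide)
  · exact col_case v "ACT" ['A','C','T'] 11 "H" (by decide) hmem (by intro c hc; fin_cases hc <;> simp) (by decide) (by decide) (by decide)
  · exact col_case v "CGT" ['C','G','T'] 14 "B" (by decide) hmem (by intro c hc; fin_cases hc <;> simp) (by decide) (by decide) (by decide)
  · exact col_case v "ACGT" ['A','C','G','T'] 15 "N" (by decide) hmem (by intro c hc; fin_cases hc <;> simp) (by decide) (by decide) (by decide)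

lemma join_empty : PySem.Str.join "" ([] : List String) = "" := by
  apply String.toList_inj.mp
  rw [joinToList]
  rfl

lemma join_cons (x : String) (M : List String) :
    PySem.Str.join "" (x :: M) = x ++ PySem.Str.join "" M := by
  apply String.toList_inj.mp
  rw [String.toList_append, joinToList, joinToList, List.map_cons, List.flatten_cons]

lemma join_eq_foldl {α : Type} (g : α → String) (l : List α) (s : String) :
    s ++ PySem.Str.join "" (l.map g) = l.foldl (fun out p => out ++ g p) s := by
  induction l generalizing s with
  | nil =>
    rw [List.map_nil, join_empty, List.foldl_nil]
    apply String.toList_inj.mp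
    simp
  | cons a rest ih =>
    rw [List.map_cons, join_cons, List.foldl_cons, ← ih (s ++ g a)]
    apply String.toList_inj.mp
    simp

lemma foldl_eq_join {α : Type} (g : α → String) (l : List α) :
    l.foldl (fun out p => out ++ g p) "" = PySem.Str.join "" (l.map g) := by
  rw [← join_eq_foldl g l ""]
  apply String.toList_inj.mp
  simp

-- ===== VERDICT (by name: the statement is the Claim_ definition above) =====
theorem alignment_to_string_py_spec : Claim_equal_alignment_to_string_py := by
  intro alignment _ hpre
  obtain ⟨hnd, hcols⟩ := hpre
  unfold Spec_alignment_to_string_py alignment_to_string_py alignment_to_string_py_alt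
  have hget : ∀ p ∈ alignment, PySem.Dict.getD (PySem.Dict.mk alignment) p.1 [] = p.2 := by
    intro p hp
    exact PySem.Dict.getD_of_mem_items _ (by simpa using hp) (by simpa using hnd) []
  have hcol : ∀ (out : String), ∀ p ∈ alignment,
      out ++ PySem.Dict.getD pvNucCode
        (PySem.Str.join "" (PySem.List.sorted
          (PySem.Set.ofList (PySem.Dict.getD (PySem.Dict.mk alignment) p.1 [])) (fun x => x.toList) false)) "" =
      out ++ PySem.Dict.getD pvCodes
        (pvMask (PySem.Dict.getD (PySem.Dict.mk alignment) p.1 [])) "" := by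
    intro out p hp
    rw [hget p hp, (col_eq p.2 (hcols p hp)).symm]
  rw [PySem.List.foldl_congr_mem _ _ _ _ hcol]
  have h := foldl_eq_join
    (fun p : String × List String =>
      PySem.Dict.getD pvCodes (pvMask (PySem.Dict.getD (PySem.Dict.mk alignment) p.1 [])) "")
    alignment
  simp only [] at h
  exact h
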